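-- pv_equiv track=rewrite | github.com/HirotakaUoi/MyNewLang | MyNewTokenAnalyzer.py | parse_definition_lines
-- ===== SOURCE A (Python) =====
-- def _strip_comment(line):
--     """mydef の行から % コメントを除去する。"""
--     # % コメントを除去する（ただしシングルクォート内の % は無視する）
--     in_quote = False
--     for idx, ch in enumerate(line):
--         if ch == "'":
--             in_quote = not in_quote
--         elif ch == "%" and not in_quote:
--             return line[:idx].strip()
--     return line.strip()
--
-- def parse_definition_lines(lines):
--     """定義ファイルの行から演算子/括弧対/コメント/キーワードを抽出する。"""
--     # .mydef から演算子/括弧対/コメント/キーワードを抽出する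
--     operators = []
--     pairs = []
--     comments = []
--     keywords = []
--
--     for raw in lines:
--         line = _strip_comment(raw)
--         if not line:
--             continue
--         if not line.endswith("."):
--             continue
--         body = line[:-1].strip()
--
--         # op('<lexeme>', <precedence>, <assoc>).
--         # 字句解析では lexeme のみを使う（他は構文解析向け）
--         if body.startswith("op(") and body.endswith(")"):
--             inner = body[3:-1].strip()
--             parts = [p.strip() for p in inner.split(",")]
--             if len(parts) != 3:
--                 continue
--             lexeme = parts[0]
--             if lexeme.startswith("'") and lexeme.endswith("'") and len(lexeme) >= 2:
--                 lexeme = lexeme[1:-1]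
--             operators.append(lexeme)
--             continue
--
--         # pair('<open>', '<close>').
--         # begin...end のような括弧対の宣言用
--         if body.startswith("pair(") and body.endswith(")"):
--             inner = body[5:-1].strip()
--             parts = [p.strip() for p in inner.split(",")]
--             if len(parts) != 2:
--                 continue
--             left, right = parts
--             if left.startswith("'") and left.endswith("'") and len(left) >= 2:
--                 left = left[1:-1]
--             if right.startswith("'") and right.endswith("'") and len(right) >= 2:
--                 right = right[1:-1]
--             pairs.append((left, right))
--             continue
--
--         # comment('<prefix>').
--         # コメント開始トークン（例: //）の宣言用
--         if body.startswith("comment(") and body.endswith(")"):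
--             inner = body[8:-1].strip()
--             if inner.startswith("'") and inner.endswith("'") and len(inner) >= 2:
--                 inner = inner[1:-1]
--             comments.append(inner)
--             continue
--
--         # keyword('<name>').
--         if body.startswith("keyword(") and body.endswith(")"):
--             inner = body[8:-1].strip()
--             if inner.startswith("'") and inner.endswith("'") and len(inner) >= 2:
--                 inner = inner[1:-1]
--             keywords.append(inner)
--             continue
--
--     return operators, pairs, comments, keywords
-- ===== SOURCE B (Python) =====
-- def _strip_comment(line):
--     """mydef の行から % コメントを除去する。"""
--     in_quote = False
--     for idx, ch in enumerate(line):
--         if ch == "'":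
--             in_quote = not in_quote
--         elif ch == "%" and not in_quote:
--             return line[:idx].strip()
--     return line.strip()
--
--
-- def _unquote(s):
--     return s[1:-1] if len(s) >= 2 and s[0] == "'" and s[-1] == "'" else s
--
--
-- def _parse_line(raw):
--     """Classify one definition line; return (kind, field1, field2) or None."""
--     line = _strip_comment(raw)
--     if not line.endswith('.'):
--         return None
--     body = line[:-1].strip()
--     if '(' not in body or not body.endswith(')'):
--         return None
--     name, _, rest = body.partition('(')
--     inner = rest[:-1].strip()
--     if name in ('comment', 'keyword'):
--         return (name, _unquote(inner), '')
--     if name not in ('op', 'pair'):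
--         return None
--     parts = [p.strip() for p in inner.split(',')]
--     if name == 'op':
--         return ('op', _unquote(parts[0]), '') if len(parts) == 3 else None
--     return ('pair', _unquote(parts[0]), _unquote(parts[1])) if len(parts) == 2 else None
--
--
-- def parse_definition_lines(lines):
--     items = [it for it in (_parse_line(raw) for raw in lines) if it is not None]
--     return ([x for k, x, _ in items if k == 'op'],
--             [(x, y) for k, x, y in items if k == 'pair'],
--             [x for k, x, _ in items if k == 'comment'],
--             [x for k, x, _ in items if k == 'keyword'])
-- ===== Notes on version B (the rewrite author's own statement) =====
-- stated objective: idiomatic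
-- what changed: Replaces A's four copy-pasted startswith-branch blocks by a single per-line parser that partitions each body at the first '(' and dispatches on the extracted name (with a shared _unquote helper), producing tagged items that are distributed into the four result lists by comprehensions.
import Mathlib
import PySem

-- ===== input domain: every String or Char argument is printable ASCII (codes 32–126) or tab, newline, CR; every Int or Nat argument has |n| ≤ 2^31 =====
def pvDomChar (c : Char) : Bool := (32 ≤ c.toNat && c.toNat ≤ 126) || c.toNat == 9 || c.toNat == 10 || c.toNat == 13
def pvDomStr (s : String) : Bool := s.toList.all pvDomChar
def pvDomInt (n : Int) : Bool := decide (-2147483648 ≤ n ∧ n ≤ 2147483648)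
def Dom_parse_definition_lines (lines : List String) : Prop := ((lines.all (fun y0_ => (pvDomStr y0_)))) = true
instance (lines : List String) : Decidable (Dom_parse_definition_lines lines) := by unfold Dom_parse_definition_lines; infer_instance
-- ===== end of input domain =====

-- B re-parses each line once via a name-dispatch helper (partition at '(' + tagged items) instead of A's
-- per-keyword startswith branch chain; same cost, different decomposition (objective: idiomatic).

-- ===== PORT A =====
-- _strip_comment (identical helper in both Source A and Source B): scan with in_quote, cut at first unquoted '%'
def stripCommentLoop : List Char → Bool → Nat → Option Nat
  | [], _, _ => none
  | c :: rest, inq, i =>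
      if c = '\'' then stripCommentLoop rest (!inq) (i + 1)
      else if c = '%' ∧ inq = false then some i
      else stripCommentLoop rest inq (i + 1)

def stripComment (line : String) : List Char :=
  match stripCommentLoop line.toList false 0 with
  | some idx => PySem.Chars.strip (PySem.List.slice line.toList none (some (idx : Int)))
  | none => PySem.Chars.strip line.toList

-- the body of A's `for raw in lines` loop, acting on the 4-list state
def pvStepA (st : List String × (List (String × String)) × List String × List String)
    (raw : String) : List String × (List (String × String)) × List String × List String :=
  let (operators, pairs, comments, keywords) := st
  let line := stripComment raw
  if line = [] then st
  else if PySem.Chars.endswith line ['.'] = false then st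
  else
    let body := PySem.Chars.strip (PySem.List.slice line none (some (-1)))
    if PySem.Chars.startswith body "op(".toList && PySem.Chars.endswith body [')'] then
      let inner := PySem.Chars.strip (PySem.List.slice body (some 3) (some (-1)))
      let parts := (PySem.Chars.splitOn inner [',']).map PySem.Chars.strip
      match parts with
      | [p0, _, _] =>
          let lexeme := if PySem.Chars.startswith p0 ['\''] && PySem.Chars.endswith p0 ['\''] && decide (2 ≤ p0.length)
            then PySem.List.slice p0 (some 1) (some (-1)) else p0
          (operators ++ [String.ofList lexeme], pairs, comments, keywords)
      | _ => st
    else if PySem.Chars.startswith body "pair(".toList && PySem.Chars.endswith body [')'] then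
      let inner := PySem.Chars.strip (PySem.List.slice body (some 5) (some (-1)))
      let parts := (PySem.Chars.splitOn inner [',']).map PySem.Chars.strip
      match parts with
      | [l0, r0] =>
          let left := if PySem.Chars.startswith l0 ['\''] && PySem.Chars.endswith l0 ['\''] && decide (2 ≤ l0.length)
            then PySem.List.slice l0 (some 1) (some (-1)) else l0
          let right := if PySem.Chars.startswith r0 ['\''] && PySem.Chars.endswith r0 ['\''] && decide (2 ≤ r0.length)
            then PySem.List.slice r0 (some 1) (some (-1)) else r0
          (operators, pairs ++ [(String.ofList left, String.ofList right)], comments, keywords)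
      | _ => st
    else if PySem.Chars.startswith body "comment(".toList && PySem.Chars.endswith body [')'] then
      let inner := PySem.Chars.strip (PySem.List.slice body (some 8) (some (-1)))
      let inner := if PySem.Chars.startswith inner ['\''] && PySem.Chars.endswith inner ['\''] && decide (2 ≤ inner.length)
        then PySem.List.slice inner (some 1) (some (-1)) else inner
      (operators, pairs, comments ++ [String.ofList inner], keywords)
    else if PySem.Chars.startswith body "keyword(".toList && PySem.Chars.endswith body [')'] then
      let inner := PySem.Chars.strip (PySem.List.slice body (some 8) (some (-1)))
      let inner := if PySem.Chars.startswith inner ['\''] && PySem.Chars.endswith inner ['\''] && decide (2 ≤ inner.length)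
        then PySem.List.slice inner (some 1) (some (-1)) else inner
      (operators, pairs, comments, keywords ++ [String.ofList inner])
    else st

def parse_definition_lines (lines : List String) :
    List String × (List (String × String)) × List String × List String :=
  lines.foldl pvStepA ([], [], [], [])

-- ===== PORT B =====
-- _unquote
def pvUnquote (s : List Char) : List Char :=
  if 2 ≤ s.length ∧ PySem.List.pyGet? s 0 = some '\'' ∧ PySem.List.pyGet? s (-1) = some '\''
  then PySem.List.slice s (some 1) (some (-1)) else s

-- _parse_line: classify one line into (kind, field1, field2), or none
def pvParseLine (raw : String) : Option (String × String × String) :=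
  let line := stripComment raw
  if PySem.Chars.endswith line ['.'] = false then none
  else
    let body := PySem.Chars.strip (PySem.List.slice line none (some (-1)))
    if PySem.Chars.isIn ['('] body = false ∨ PySem.Chars.endswith body [')'] = false then none
    else
      -- body.partition('(') ported by hand: name = chars before the first '(', rest = chars after it
      -- (exact here because the guard above ensures '(' occurs in body)
      let name := body.takeWhile (· ≠ '(')
      let rest := body.drop (name.length + 1)
      let inner := PySem.Chars.strip (PySem.List.slice rest none (some (-1)))
      if name = "comment".toList ∨ name = "keyword".toList then
        some (String.ofList name, String.ofList (pvUnquote inner), "")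
      else if ¬ (name = "op".toList ∨ name = "pair".toList) then none
      else
        let parts := (PySem.Chars.splitOn inner [',']).map PySem.Chars.strip
        if name = "op".toList then
          if parts.length = 3 then some ("op", String.ofList (pvUnquote parts[0]!), "") else none
        else
          if parts.length = 2 then some ("pair", String.ofList (pvUnquote parts[0]!), String.ofList (pvUnquote parts[1]!)) else none

def parse_definition_lines_alt (lines : List String) :
    List String × (List (String × String)) × List String × List String :=
  let items := lines.filterMap pvParseLine
  ((items.filter (fun t => t.1 == "op")).map (fun t => t.2.1),
   (items.filter (fun t => t.1 == "pair")).map (fun t => (t.2.1, t.2.2)),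
   (items.filter (fun t => t.1 == "comment")).map (fun t => t.2.1),
   (items.filter (fun t => t.1 == "keyword")).map (fun t => t.2.1))

-- ===== PRECONDITION & SPEC =====
def Spec_parse_definition_lines (lines : List String) (out : List String × (List (String × String)) × List String × List String) : Prop := out = parse_definition_lines_alt lines
instance (lines : List String) (out : List String × (List (String × String)) × List String × List String) : Decidable (Spec_parse_definition_lines lines out) := by unfold Spec_parse_definition_lines; infer_instance

-- ===== CLAIM (what is proved, stated in full; the proofs are below) =====
def Claim_equal_parse_definition_lines : Prop := ∀ (lines : List String), Dom_parse_definition_lines lines → Spec_parse_definition_lines lines (parse_definition_lines lines)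

-- ===== LEMMAS AND PROOFS =====

lemma pvSlice_to_neg_one (cs : List Char) : PySem.List.slice cs none (some (-1)) = cs.dropLast := by
  simp [pysem]

lemma pvSlice_drop (cs : List Char) (k : Nat) :
    PySem.List.slice cs (some (k : Int)) (some (-1)) = (cs.drop k).dropLast := by
  simp only [PySem.List.slice, Int.reduceNeg, Order.lt_one_iff, PySem.List.clampIdx_neg_ofNat,
    Nat.cast_nonneg, PySem.List.clampIdx_of_nonneg, Int.toNat_natCast]
  rcases Nat.le_total k cs.length with h | h
  · rw [Nat.min_eq_left h, List.dropLast_eq_take]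
    congr 1
    simp
    omega
  · rw [Nat.min_eq_right h]
    simp [List.drop_of_length_le h]

lemma pvSlice3 (cs : List Char) : PySem.List.slice cs (some 3) (some (-1)) = (cs.drop 3).dropLast := by
  simpa using pvSlice_drop cs 3

lemma pvSlice5 (cs : List Char) : PySem.List.slice cs (some 5) (some (-1)) = (cs.drop 5).dropLast := by
  simpa using pvSlice_drop cs 5

lemma pvSlice8 (cs : List Char) : PySem.List.slice cs (some 8) (some (-1)) = (cs.drop 8).dropLast := by
  simpa using pvSlice_drop cs 8

lemma pvPrefix_singleton (l : List Char) (a : Char) : [a] <+: l ↔ l.head? = some a := by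
  cases l <;> simp [List.cons_prefix_cons, eq_comm]

lemma pvSuffix_singleton (l : List Char) (a : Char) : [a] <:+ l ↔ l.getLast? = some a := by
  constructor
  · rintro ⟨t, rfl⟩; simp
  · intro h
    rcases List.eq_nil_or_concat l with rfl | ⟨t, b, rfl⟩
    · simp at h
    · simp at h; subst h; exact ⟨t, by simp⟩

lemma pvGet_zero (p : List Char) : PySem.List.pyGet? p (0 : Int) = p.head? := by
  simp [pysem]
  exact List.head?_eq_getElem?.symm

lemma pvGet_neg_one (p : List Char) : PySem.List.pyGet? p (-1) = p.getLast? := by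
  unfold PySem.List.pyGet? PySem.List.pyIdx?
  rcases List.eq_nil_or_concat p with rfl | ⟨t, b, rfl⟩
  · simp
  · simp only [List.concat_eq_append, List.length_append, List.length_singleton]
    rw [if_neg (by norm_num : ¬ (0:Int) ≤ -1)]
    rw [if_pos (by push_cast; omega : -(((t.length + 1 : Nat)):Int) ≤ -1)]
    simp

-- A's inline quote-stripping expression computes Source B's _unquote
lemma pvUnquote_eq (p : List Char) :
    (if PySem.Chars.startswith p ['\''] && PySem.Chars.endswith p ['\''] && decide (2 ≤ p.length)
      then PySem.List.slice p (some 1) (some (-1)) else p) = pvUnquote p := by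
  unfold pvUnquote
  have hcond : (PySem.Chars.startswith p ['\''] && PySem.Chars.endswith p ['\''] && decide (2 ≤ p.length)) = true
      ↔ (2 ≤ p.length ∧ PySem.List.pyGet? p 0 = some '\'' ∧ PySem.List.pyGet? p (-1) = some '\'') := by
    simp only [Bool.and_eq_true, decide_eq_true_eq, PySem.Chars.startswith_iff,
      PySem.Chars.endswith_iff, pvPrefix_singleton, pvSuffix_singleton, pvGet_zero, pvGet_neg_one]
    tauto
  split_ifs with h1 h2 h2 <;> first
    | rfl
    | (exact absurd (hcond.mp h1) h2)
    | (exact absurd (hcond.mpr h2) (by simpa using h1))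

lemma pvUnquote_eq' (p : List Char) :
    (if (PySem.Chars.startswith p ['\''] = true ∧ PySem.Chars.endswith p ['\''] = true) ∧ 2 ≤ p.length
      then PySem.List.slice p (some 1) (some (-1)) else p) = pvUnquote p := by
  simpa using pvUnquote_eq p

lemma pvAndFalse {x y : Bool} (h : x = false) : ¬ ((x && y) = true) := by simp [h]

lemma pvDropWhile_head_false (p : Char → Bool) (l t : List Char) (x : Char)
    (hd : List.dropWhile p l = x :: t) : p x = false := by
  have hne : List.dropWhile p l ≠ [] := by rw [hd]; simp
  have h0 := List.head_dropWhile_not p hne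
  have h1 : (List.dropWhile p l).head? = some x := by rw [hd]; rfl
  have h2 := List.head?_eq_some_head hne
  rw [h1] at h2
  injection h2 with h2
  rw [h2]
  exact h0

-- the heart of the matter: A's `body.startswith("<name>(")` test equals B's partition-based dispatch
lemma pvBranch_iff (cs nm : List Char) (h : '(' ∉ nm) :
    PySem.Chars.startswith cs (nm ++ ['(']) = true ↔ ('(' ∈ cs ∧ cs.takeWhile (· ≠ '(') = nm) := by
  rw [PySem.Chars.startswith_iff]
  constructor
  · rintro ⟨t, rfl⟩
    refine ⟨by simp, ?_⟩
    have htw : nm.takeWhile (fun c => decide (c ≠ '(')) = nm := by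
      rw [List.takeWhile_eq_self_iff]
      intro x hx; simp; exact fun he => h (he ▸ hx)
    rw [List.append_assoc, List.takeWhile_append, if_pos (by rw [htw])]
    simp
  · rintro ⟨h1, h2⟩
    have hsplit := List.takeWhile_append_dropWhile (p := fun c => decide (c ≠ '(')) (l := cs)
    cases hd : cs.dropWhile (fun c => decide (c ≠ '(')) with
    | nil =>
      exfalso
      rw [hd, List.append_nil] at hsplit
      rw [← hsplit] at h1
      have := List.mem_takeWhile_imp h1
      simp at this
    | cons x t =>
      have hx : x = '(' := by
        have := pvDropWhile_head_false _ _ _ _ hd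
        simpa using this
      refine ⟨t, ?_⟩
      rw [← hsplit, h2, hd, hx]
      simp

lemma pvStepA_eq (a : List String) (b : List (String × String)) (c d : List String) (raw : String) :
    pvStepA (a, b, c, d) raw =
      match pvParseLine raw with
      | none => (a, b, c, d)
      | some (k, x, y) =>
          if k = "op" then (a ++ [x], b, c, d)
          else if k = "pair" then (a, b ++ [(x, y)], c, d)
          else if k = "comment" then (a, b, c ++ [x], d)
          else if k = "keyword" then (a, b, c, d ++ [x])
          else (a, b, c, d) := by
  unfold pvStepA pvParseLine
  dsimp only
  generalize stripComment raw = line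
  by_cases hnil : line = []
  · subst hnil
    rfl
  · rw [if_neg hnil]
    by_cases hdot : PySem.Chars.endswith line ['.'] = false
    · rw [if_pos hdot, if_pos hdot]
    · rw [if_neg hdot, if_neg hdot]
      generalize hbd : PySem.Chars.strip (PySem.List.slice line none (some (-1))) = bd
      by_cases hrp : PySem.Chars.endswith bd [')'] = true
      · by_cases hin : '(' ∈ bd
        · have hin' : PySem.Chars.isIn ['('] bd = true := by
            rw [PySem.Chars.isIn_iff_infix]; exact (List.singleton_infix_iff _ _).mpr hin
          have hswf : ∀ nm : List Char, '(' ∉ nm → bd.takeWhile (· ≠ '(') ≠ nm →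
              PySem.Chars.startswith bd (nm ++ ['(']) = false := by
            intro nm hnm hne
            rw [Bool.eq_false_iff]
            intro h
            exact hne ((pvBranch_iff bd nm hnm).mp h).2
          by_cases h1 : bd.takeWhile (· ≠ '(') = "op".toList
          · have hsw := (pvBranch_iff bd "op".toList (by decide)).mpr ⟨hin, h1⟩
            obtain ⟨t, ht⟩ := (PySem.Chars.startswith_iff _ _).mp hsw
            subst ht
            have hop : (PySem.Chars.startswith ("op".toList ++ ['('] ++ t) "op(".toList
                && PySem.Chars.endswith ("op".toList ++ ['('] ++ t) [')']) = true := by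
              rw [Bool.and_eq_true]; exact ⟨hsw, hrp⟩
            rw [if_pos hop]
            rw [if_neg (show ¬ (PySem.Chars.isIn ['('] ("op".toList ++ ['('] ++ t) = false
                ∨ PySem.Chars.endswith ("op".toList ++ ['('] ++ t) [')'] = false) by
              rintro (h | h) <;> simp_all)]
            rw [h1]
            rw [pvSlice3, pvSlice_to_neg_one]
            have hdrop3 : List.drop 3 ("op".toList ++ ['('] ++ t) = t := by simp
            have hdropn : List.drop ("op".toList.length + 1) ("op".toList ++ ['('] ++ t) = t := by simp
            rw [hdrop3, hdropn]
            rw [if_neg (by decide), if_neg (by decide), if_pos rfl]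
            generalize List.map PySem.Chars.strip (PySem.Chars.splitOn (PySem.Chars.strip t.dropLast) [',']) = parts
            rcases parts with _ | ⟨p0, _ | ⟨p1, _ | ⟨p2, _ | ⟨p3, ps⟩⟩⟩⟩ <;>
              simp [pvUnquote_eq']
          · by_cases h2 : bd.takeWhile (· ≠ '(') = "pair".toList
            · have hsw := (pvBranch_iff bd "pair".toList (by decide)).mpr ⟨hin, h2⟩
              obtain ⟨t, ht⟩ := (PySem.Chars.startswith_iff _ _).mp hsw
              subst ht
              have e1 := hswf "op".toList (by decide) (by rw [h2]; decide)
              have hpr : (PySem.Chars.startswith ("pair".toList ++ ['('] ++ t) "pair(".toList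
                  && PySem.Chars.endswith ("pair".toList ++ ['('] ++ t) [')']) = true := by
                rw [Bool.and_eq_true]; exact ⟨hsw, hrp⟩
              rw [show ("op(".toList) = "op".toList ++ ['('] from rfl]
              rw [if_neg (pvAndFalse e1), if_pos hpr]
              rw [if_neg (show ¬ (PySem.Chars.isIn ['('] ("pair".toList ++ ['('] ++ t) = false
                  ∨ PySem.Chars.endswith ("pair".toList ++ ['('] ++ t) [')'] = false) by
                rintro (h | h) <;> simp_all)]
              rw [h2]
              rw [pvSlice5, pvSlice_to_neg_one]
              have hdrop5 : List.drop 5 ("pair".toList ++ ['('] ++ t) = t := by simp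
              have hdropn : List.drop ("pair".toList.length + 1) ("pair".toList ++ ['('] ++ t) = t := by simp
              rw [hdrop5, hdropn]
              rw [if_neg (by decide), if_neg (by decide), if_neg (by decide)]
              generalize List.map PySem.Chars.strip (PySem.Chars.splitOn (PySem.Chars.strip t.dropLast) [',']) = parts
              rcases parts with _ | ⟨p0, _ | ⟨p1, _ | ⟨p2, ps⟩⟩⟩ <;>
                simp [pvUnquote_eq']
            · by_cases h3 : bd.takeWhile (· ≠ '(') = "comment".toList
              · have hsw := (pvBranch_iff bd "comment".toList (by decide)).mpr ⟨hin, h3⟩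
                obtain ⟨t, ht⟩ := (PySem.Chars.startswith_iff _ _).mp hsw
                subst ht
                have e1 := hswf "op".toList (by decide) (by rw [h3]; decide)
                have e2 := hswf "pair".toList (by decide) (by rw [h3]; decide)
                have hcm : (PySem.Chars.startswith ("comment".toList ++ ['('] ++ t) "comment(".toList
                    && PySem.Chars.endswith ("comment".toList ++ ['('] ++ t) [')']) = true := by
                  rw [Bool.and_eq_true]; exact ⟨hsw, hrp⟩
                rw [show ("op(".toList) = "op".toList ++ ['('] from rfl,
                    show ("pair(".toList) = "pair".toList ++ ['('] from rfl]
                rw [if_neg (pvAndFalse e1), if_neg (pvAndFalse e2), if_pos hcm]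
                rw [if_neg (show ¬ (PySem.Chars.isIn ['('] ("comment".toList ++ ['('] ++ t) = false
                    ∨ PySem.Chars.endswith ("comment".toList ++ ['('] ++ t) [')'] = false) by
                  rintro (h | h) <;> simp_all)]
                rw [h3]
                rw [pvSlice8, pvSlice_to_neg_one]
                have hdrop8 : List.drop 8 ("comment".toList ++ ['('] ++ t) = t := by simp
                have hdropn : List.drop ("comment".toList.length + 1) ("comment".toList ++ ['('] ++ t) = t := by simp
                rw [hdrop8, hdropn]
                rw [if_pos (Or.inl rfl)]
                simp [pvUnquote_eq']
              · by_cases h4 : bd.takeWhile (· ≠ '(') = "keyword".toList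
                · have hsw := (pvBranch_iff bd "keyword".toList (by decide)).mpr ⟨hin, h4⟩
                  obtain ⟨t, ht⟩ := (PySem.Chars.startswith_iff _ _).mp hsw
                  subst ht
                  have e1 := hswf "op".toList (by decide) (by rw [h4]; decide)
                  have e2 := hswf "pair".toList (by decide) (by rw [h4]; decide)
                  have e3 := hswf "comment".toList (by decide) (by rw [h4]; decide)
                  have hkw : (PySem.Chars.startswith ("keyword".toList ++ ['('] ++ t) "keyword(".toList
                      && PySem.Chars.endswith ("keyword".toList ++ ['('] ++ t) [')']) = true := by
                    rw [Bool.and_eq_true]; exact ⟨hsw, hrp⟩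
                  rw [show ("op(".toList) = "op".toList ++ ['('] from rfl,
                      show ("pair(".toList) = "pair".toList ++ ['('] from rfl,
                      show ("comment(".toList) = "comment".toList ++ ['('] from rfl]
                  rw [if_neg (pvAndFalse e1), if_neg (pvAndFalse e2), if_neg (pvAndFalse e3), if_pos hkw]
                  rw [if_neg (show ¬ (PySem.Chars.isIn ['('] ("keyword".toList ++ ['('] ++ t) = false
                      ∨ PySem.Chars.endswith ("keyword".toList ++ ['('] ++ t) [')'] = false) by
                    rintro (h | h) <;> simp_all)]
                  rw [h4]
                  rw [pvSlice8, pvSlice_to_neg_one]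
                  have hdrop8 : List.drop 8 ("keyword".toList ++ ['('] ++ t) = t := by simp
                  have hdropn : List.drop ("keyword".toList.length + 1) ("keyword".toList ++ ['('] ++ t) = t := by simp
                  rw [hdrop8, hdropn]
                  rw [if_pos (Or.inr rfl)]
                  simp [pvUnquote_eq']
                · have e1 := hswf "op".toList (by decide) h1
                  have e2 := hswf "pair".toList (by decide) h2
                  have e3 := hswf "comment".toList (by decide) h3
                  have e4 := hswf "keyword".toList (by decide) h4
                  rw [show ("op(".toList) = "op".toList ++ ['('] from rfl,
                      show ("pair(".toList) = "pair".toList ++ ['('] from rfl,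
                      show ("comment(".toList) = "comment".toList ++ ['('] from rfl,
                      show ("keyword(".toList) = "keyword".toList ++ ['('] from rfl]
                  rw [if_neg (pvAndFalse e1), if_neg (pvAndFalse e2), if_neg (pvAndFalse e3), if_neg (pvAndFalse e4)]
                  rw [if_neg (show ¬ (PySem.Chars.isIn ['('] bd = false
                      ∨ PySem.Chars.endswith bd [')'] = false) by
                    rintro (h | h) <;> simp_all)]
                  rw [if_neg (by rintro (h | h) <;> simp_all), if_pos (by rintro (h | h) <;> simp_all)]
        · have hin' : PySem.Chars.isIn ['('] bd = false := by
            rw [Bool.eq_false_iff]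
            intro h
            exact hin ((List.singleton_infix_iff _ _).mp ((PySem.Chars.isIn_iff_infix _ _).mp h))
          have hswf0 : ∀ nm : List Char, PySem.Chars.startswith bd (nm ++ ['(']) = false := by
            intro nm
            rw [Bool.eq_false_iff]
            intro h
            rcases (PySem.Chars.startswith_iff _ _).mp h with ⟨t, rfl⟩
            exact hin (by simp)
          have e1 := hswf0 "op".toList
          have e2 := hswf0 "pair".toList
          have e3 := hswf0 "comment".toList
          have e4 := hswf0 "keyword".toList
          rw [show ("op(".toList) = "op".toList ++ ['('] from rfl,
              show ("pair(".toList) = "pair".toList ++ ['('] from rfl,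
              show ("comment(".toList) = "comment".toList ++ ['('] from rfl,
              show ("keyword(".toList) = "keyword".toList ++ ['('] from rfl]
          rw [if_neg (pvAndFalse e1), if_neg (pvAndFalse e2), if_neg (pvAndFalse e3), if_neg (pvAndFalse e4)]
          rw [if_pos (Or.inl hin')]
      · have hrp' : PySem.Chars.endswith bd [')'] = false := by simpa using hrp
        simp [hrp']

lemma pvFold_eq (lines : List String) (a : List String) (b : List (String × String)) (c d : List String) :
    lines.foldl pvStepA (a, b, c, d) =
      (a ++ ((lines.filterMap pvParseLine).filter (fun t => t.1 == "op")).map (fun t => t.2.1),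
       b ++ ((lines.filterMap pvParseLine).filter (fun t => t.1 == "pair")).map (fun t => (t.2.1, t.2.2)),
       c ++ ((lines.filterMap pvParseLine).filter (fun t => t.1 == "comment")).map (fun t => t.2.1),
       d ++ ((lines.filterMap pvParseLine).filter (fun t => t.1 == "keyword")).map (fun t => t.2.1)) := by
  induction lines generalizing a b c d with
  | nil => simp
  | cons raw rest ih =>
    rw [List.foldl_cons, pvStepA_eq]
    cases hP : pvParseLine raw with
    | none => simp only [hP, List.filterMap_cons, ih]
    | some t =>
      obtain ⟨k, x, y⟩ := t
      by_cases h1 : k = "op"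
      · subst h1; simp [hP, ih]
      · by_cases h2 : k = "pair"
        · subst h2; simp [hP, ih]
        · by_cases h3 : k = "comment"
          · subst h3; simp [hP, ih]
          · by_cases h4 : k = "keyword"
            · subst h4; simp [hP, ih]
            · simp [hP, ih, h1, h2, h3, h4]

-- ===== VERDICT (by name: the statement is the Claim_ definition above) =====
theorem parse_definition_lines_spec : Claim_equal_parse_definition_lines := by
  intro lines _
  unfold Spec_parse_definition_lines parse_definition_lines parse_definition_lines_alt
  simpa using pvFold_eq lines [] [] [] []
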